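-- pv_equiv track=rewrite | github.com/bmmeijers/mapedge | src/mapedge/lib/trace/intervals.py | _generate_intervals
-- ===== SOURCE A (Python) =====
-- def _generate_intervals(arr, threshold):
--     intervals = []
--     start_idx = None
--
--     # FIXME: the > and <= comparisions make that we can only search for above a threshold
--     for end_idx in range(len(arr)):
--         if (arr[end_idx] > threshold) and start_idx is None:
--             start_idx = end_idx
--         elif (arr[end_idx] <= threshold) and start_idx is not None:
--             intervals.append((start_idx, end_idx))
--             start_idx = None
--
--     if start_idx is not None:
--         intervals.append((start_idx, len(arr)))
--
--     return intervals
-- ===== SOURCE B (Python) =====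
-- def _generate_intervals(arr, threshold):
--     # Run-scan decomposition: find each maximal run of values above the
--     # threshold with an inner scan, instead of a carried-state machine.
--     intervals = []
--     i, n = 0, len(arr)
--     while i < n:
--         if arr[i] > threshold:
--             j = i + 1
--             while j < n and arr[j] > threshold:
--                 j += 1
--             intervals.append((i, j))
--             i = j
--         else:
--             i += 1
--     return intervals
-- ===== Notes on version B (the rewrite author's own statement) =====
-- stated objective: alternative
-- what changed: Replaced A's single-pass state machine (carried start_idx sentinel with a trailing flush) by a run-scan decomposition: an outer scan that, on meeting a value above the threshold, runs an inner scan to the end of the maximal run and emits (start, end) immediately, so no carried state or trailing special case exists.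
import Mathlib
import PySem

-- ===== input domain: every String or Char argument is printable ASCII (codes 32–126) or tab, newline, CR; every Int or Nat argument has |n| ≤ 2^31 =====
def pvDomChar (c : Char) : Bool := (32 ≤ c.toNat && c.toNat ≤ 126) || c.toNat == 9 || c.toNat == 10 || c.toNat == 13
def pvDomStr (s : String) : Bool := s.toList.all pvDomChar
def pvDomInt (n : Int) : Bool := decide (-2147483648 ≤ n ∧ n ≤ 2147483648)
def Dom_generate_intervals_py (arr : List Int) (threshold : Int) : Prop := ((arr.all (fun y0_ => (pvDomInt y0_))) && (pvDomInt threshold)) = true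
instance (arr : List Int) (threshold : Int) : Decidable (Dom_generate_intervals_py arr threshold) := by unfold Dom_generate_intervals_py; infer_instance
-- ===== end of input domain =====

-- B replaces A's carried-sentinel state machine with a run-scan decomposition
-- (inner scan per above-threshold run); same O(n) cost, no trailing flush.

-- ===== PORT A =====
-- loop body of A's for-loop: state = (intervals, start_idx)
def aStep (threshold : Int) (st : List (Int × Int) × Option Int) (end_idx v : Int) :
    List (Int × Int) × Option Int :=
  if v > threshold ∧ st.2 = none then (st.1, some end_idx)
  else if v ≤ threshold ∧ st.2.isSome then (st.1 ++ [(st.2.getD 0, end_idx)], none)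
  else st

-- arr[end_idx] is always in range here, so pyGetD with a dummy default is exact
def generate_intervals_py (arr : List Int) (threshold : Int) : List (Int × Int) :=
  let st := (PySem.List.pyRange 0 (arr.length : Int) 1).foldl
    (fun st end_idx => aStep threshold st end_idx (PySem.List.pyGetD arr end_idx 0))
    ([], none)
  match st.2 with
  | some s => st.1 ++ [(s, (arr.length : Int))]
  | none => st.1

-- ===== PORT B =====
-- inner while loop: advance j past the run of values above threshold
def runScan (threshold : Int) (j : Int) : List Int → Int × List Int
  | [] => (j, [])
  | x :: xs => if x > threshold then runScan threshold (j + 1) xs else (j, x :: xs)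

theorem runScan_len (threshold j : Int) (xs : List Int) :
    (runScan threshold j xs).2.length ≤ xs.length := by
  induction xs generalizing j with
  | nil => simp [runScan]
  | cons x xs ih =>
    simp only [runScan]
    split
    · exact le_trans (ih _) (Nat.le_succ _)
    · simp

-- outer while loop of B
def runLoop (threshold : Int) (i : Int) : List Int → List (Int × Int)
  | [] => []
  | x :: xs =>
    if x > threshold then
      (i, (runScan threshold (i + 1) xs).1) ::
        runLoop threshold (runScan threshold (i + 1) xs).1 (runScan threshold (i + 1) xs).2
    else runLoop threshold (i + 1) xs
termination_by xs => xs.length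
decreasing_by
  · have := runScan_len threshold (i + 1) xs; simp; omega
  · simp

def generate_intervals_py_alt (arr : List Int) (threshold : Int) : List (Int × Int) :=
  runLoop threshold 0 arr

-- ===== PRECONDITION & SPEC =====
def Spec_generate_intervals_py (arr : List Int) (threshold : Int) (out : List (Int × Int)) : Prop := out = generate_intervals_py_alt arr threshold
instance (arr : List Int) (threshold : Int) (out : List (Int × Int)) : Decidable (Spec_generate_intervals_py arr threshold out) := by unfold Spec_generate_intervals_py; infer_instance

-- ===== CLAIM (what is proved, stated in full; the proofs are below) =====
def Claim_equal_generate_intervals_py : Prop := ∀ (arr : List Int) (threshold : Int), Dom_generate_intervals_py arr threshold → Spec_generate_intervals_py arr threshold (generate_intervals_py arr threshold)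

-- ===== LEMMAS AND PROOFS =====

-- close A's loop result: append the trailing interval if a run is open
def finishA (st : List (Int × Int) × Option Int) (n : Int) : List (Int × Int) :=
  match st.2 with
  | some s => st.1 ++ [(s, n)]
  | none => st.1

theorem aStep_none_pos (threshold : Int) (acc : List (Int × Int)) (j v : Int)
    (hv : v > threshold) : aStep threshold (acc, none) j v = (acc, some j) := by
  simp [aStep, hv]

theorem aStep_none_neg (threshold : Int) (acc : List (Int × Int)) (j v : Int)
    (hv : ¬ v > threshold) : aStep threshold (acc, none) j v = (acc, none) := by
  simp [aStep, hv]

theorem aStep_some_pos (threshold : Int) (acc : List (Int × Int)) (j v s : Int)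
    (hv : v > threshold) : aStep threshold (acc, some s) j v = (acc, some s) := by
  simp [aStep]; omega

theorem aStep_some_neg (threshold : Int) (acc : List (Int × Int)) (j v s : Int)
    (hv : ¬ v > threshold) : aStep threshold (acc, some s) j v = (acc ++ [(s, j)], none) := by
  simp [aStep]; omega

-- joint loop invariant: running A's state machine over the suffix xs whose head has
-- index j equals B's run-scan output, in both the closed (none) and open (some s) states
theorem loop_inv (threshold : Int) (xs : List Int) :
    (∀ (j : Int) (acc : List (Int × Int)),
      finishA ((PySem.List.enumerate xs j).foldl
        (fun st p => aStep threshold st p.1 p.2) (acc, none)) (j + xs.length)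
        = acc ++ runLoop threshold j xs)
    ∧ (∀ (j : Int) (acc : List (Int × Int)) (s : Int),
      finishA ((PySem.List.enumerate xs j).foldl
        (fun st p => aStep threshold st p.1 p.2) (acc, some s)) (j + xs.length)
        = acc ++ (s, (runScan threshold j xs).1) ::
            runLoop threshold (runScan threshold j xs).1 (runScan threshold j xs).2) := by
  induction xs with
  | nil =>
    refine ⟨fun j acc => ?_, fun j acc s => ?_⟩
    · simp [PySem.List.enumerate, finishA, runLoop]
    · simp [PySem.List.enumerate, finishA, runScan, runLoop]
  | cons x xs ih =>
    have hcast : ∀ j : Int, j + ((x :: xs).length : Int) = (j + 1) + (xs.length : Int) := by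
      intro j; simp; omega
    refine ⟨fun j acc => ?_, fun j acc s => ?_⟩
    · rw [PySem.List.enumerate_cons, List.foldl_cons, hcast j]
      by_cases hx : x > threshold
      · simp only [aStep_none_pos threshold acc j x hx]
        rw [ih.2 (j + 1) acc j]
        simp [runLoop, hx]
      · simp only [aStep_none_neg threshold acc j x hx]
        rw [ih.1 (j + 1) acc]
        simp [runLoop, hx]
    · rw [PySem.List.enumerate_cons, List.foldl_cons, hcast j]
      by_cases hx : x > threshold
      · simp only [aStep_some_pos threshold acc j x s hx]
        rw [ih.2 (j + 1) acc s]
        simp [runScan, hx]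
      · simp only [aStep_some_neg threshold acc j x s hx]
        rw [ih.1 (j + 1) (acc ++ [(s, j)])]
        simp [runScan, runLoop, hx]

-- ===== VERDICT (by name: the statement is the Claim_ definition above) =====
theorem generate_intervals_py_spec : Claim_equal_generate_intervals_py := by
  intro arr threshold _
  show generate_intervals_py arr threshold = generate_intervals_py_alt arr threshold
  unfold generate_intervals_py generate_intervals_py_alt
  have hmap : PySem.List.enumerate arr 0
      = (PySem.List.pyRange 0 (arr.length : Int) 1).map (fun j => (j, PySem.List.pyGetD arr j 0)) := by
    simpa using PySem.List.enumerate_eq_map_pyRange (xs := arr) (d := 0)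
  have := (loop_inv threshold arr).1 0 []
  rw [hmap, List.foldl_map] at this
  simpa [finishA] using this
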